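-- pv_equiv track=rewrite | github.com/The-Gokul-Kishore/codeforces_solutions | SPC_finals/div.py | search
-- ===== SOURCE A (Python) =====
-- def search(a, divs):
--     left, right = 0, len(divs) - 1
--     while left <= right:
--         mid = left + (right - left) // 2
--         if a % divs[mid] != 0:
--             right = mid - 1
--         else:
--             left = mid + 1
--     return right
-- ===== SOURCE B (Python) =====
-- def search(a, divs):
--     # Divide and conquer on list segments: recurse on the half-slice itself,
--     # carrying only the absolute offset of the segment's start.
--     def go(offset, seg):
--         if not seg:
--             return offset - 1
--         m = (len(seg) - 1) // 2
--         if a % seg[m] != 0: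
--             return go(offset, seg[:m])
--         return go(offset + m + 1, seg[m + 1:])
--     return go(0, divs)
-- ===== Notes on version B (the rewrite author's own statement) =====
-- stated objective: alternative
-- what changed: The iterative two-pointer while loop over indices is replaced by a divide-and-conquer recursion on list segments: the helper recurses on the half-slice itself (seg[:m] / seg[m+1:]) carrying only the segment's start offset, preserving the exact probe sequence.
-- outside the precondition, e.g. on search(5, [2, 0]): A returns -1, B returns -1
import Mathlib
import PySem

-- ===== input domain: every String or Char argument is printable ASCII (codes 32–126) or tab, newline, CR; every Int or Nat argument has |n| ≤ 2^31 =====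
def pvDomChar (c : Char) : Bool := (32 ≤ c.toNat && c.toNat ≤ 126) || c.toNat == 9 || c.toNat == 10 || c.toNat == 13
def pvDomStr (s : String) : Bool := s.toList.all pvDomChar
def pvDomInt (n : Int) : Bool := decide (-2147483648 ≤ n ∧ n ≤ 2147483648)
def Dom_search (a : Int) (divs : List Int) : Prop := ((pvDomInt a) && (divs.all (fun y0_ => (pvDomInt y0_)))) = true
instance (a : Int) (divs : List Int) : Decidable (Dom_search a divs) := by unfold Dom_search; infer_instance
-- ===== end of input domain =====

-- B replaces A's two-pointer while loop by a divide-and-conquer recursion on list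
-- segments (slicing off the probed half, carrying the segment's start offset);
-- same probe sequence and value, no speed claim (objective: alternative).


-- ===== PORT A =====
-- termination measures for the ports (cited by name in decreasing_by; no proof terms in the bodies)
theorem searchGo_dec_left (left right : Int) (h : left ≤ right) :
    (left + PySem.Int.floordiv (right - left) 2 - 1 + 1 - left).toNat < (right + 1 - left).toNat := by
  rw [PySem.Int.floordiv_eq_ediv_of_pos (by norm_num : (0:Int) < 2)]
  omega

theorem searchGo_dec_right (left right : Int) (h : left ≤ right) :
    (right + 1 - (left + PySem.Int.floordiv (right - left) 2 + 1)).toNat < (right + 1 - left).toNat := by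
  rw [PySem.Int.floordiv_eq_ediv_of_pos (by norm_num : (0:Int) < 2)]
  omega

-- while left <= right: mid = left + (right-left)//2; probe divs[mid]; move one pointer
def searchGo (a : Int) (divs : List Int) (left right : Int) : Int :=
  if left ≤ right then
    let mid := left + PySem.Int.floordiv (right - left) 2
    if PySem.Int.mod a ((PySem.List.pyGet? divs mid).getD 1) ≠ 0 then
      searchGo a divs left (mid - 1)
    else
      searchGo a divs (mid + 1) right
  else right
termination_by (right + 1 - left).toNat
decreasing_by
  · exact searchGo_dec_left left right (by assumption)
  · exact searchGo_dec_right left right (by assumption)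

def search (a : Int) (divs : List Int) : Int :=
  searchGo a divs 0 (divs.length - 1)

-- ===== PORT B =====
theorem searchAltGo_dec_left (seg : List Int) (h : ¬ seg.isEmpty = true) :
    (seg.take ((seg.length - 1) / 2)).length < seg.length := by
  have hlen : 0 < seg.length := by
    cases seg with
    | nil => simp at h
    | cons x xs => simp
  calc (seg.take ((seg.length - 1) / 2)).length ≤ (seg.length - 1) / 2 :=
        List.length_take_le _ _
    _ < seg.length := by omega

theorem searchAltGo_dec_right (seg : List Int) (h : ¬ seg.isEmpty = true) :
    (seg.drop ((seg.length - 1) / 2 + 1)).length < seg.length := by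
  have hlen : 0 < seg.length := by
    cases seg with
    | nil => simp at h
    | cons x xs => simp
  simp only [List.length_drop]; omega

-- go(offset, seg): empty -> offset-1; probe seg[m], m = (len(seg)-1)//2; recurse on seg[:m] or seg[m+1:]
def searchAltGo (a : Int) (offset : Int) (seg : List Int) : Int :=
  if seg.isEmpty then offset - 1
  else
    let m : Nat := (seg.length - 1) / 2
    if PySem.Int.mod a ((PySem.List.pyGet? seg (m : Int)).getD 1) ≠ 0 then
      searchAltGo a offset (seg.take m)
    else
      searchAltGo a (offset + (m : Int) + 1) (seg.drop (m + 1))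
termination_by seg.length
decreasing_by
  · exact searchAltGo_dec_left seg (by assumption)
  · exact searchAltGo_dec_right seg (by assumption)

def search_alt (a : Int) (divs : List Int) : Int :=
  searchAltGo a 0 divs

-- ===== PRECONDITION & SPEC =====
-- Pre_ excludes lists containing 0, on which Python A may raise ZeroDivisionError
-- at a probed index (it can also return normally when the 0 is never probed).
def Pre_search (a : Int) (divs : List Int) : Prop := (0 : Int) ∉ divs
instance (a : Int) (divs : List Int) : Decidable (Pre_search a divs) := by unfold Pre_search; infer_instance
def pvWitness_search : Int × List Int := (12, [1, 2, 4, 5])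

def Spec_search (a : Int) (divs : List Int) (out : Int) : Prop := out = search_alt a divs
instance (a : Int) (divs : List Int) (out : Int) : Decidable (Spec_search a divs out) := by unfold Spec_search; infer_instance

-- ===== CLAIM (what is proved, stated in full; the proofs are below) =====
def Claim_equal_search : Prop := ∀ (a : Int) (divs : List Int), Dom_search a divs → Pre_search a divs → Spec_search a divs (search a divs)

-- ===== LEMMAS AND PROOFS =====

-- The loop on (left, right) equals B's recursion on the segment divs[left : right+1].
theorem searchGo_eq_alt (a : Int) (divs : List Int) :
    ∀ (n : Nat) (l r : Int), 0 ≤ l → l ≤ r + 1 → r < (divs.length : Int) →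
      (r + 1 - l).toNat = n →
      searchGo a divs l r = searchAltGo a l ((divs.drop l.toNat).take n) := by
  intro n
  induction n using Nat.strong_induction_on with
  | _ n ih =>
    intro l r hl0 hlr hrlen hn
    by_cases hle : l ≤ r
    · -- nonempty segment
      have hn1 : 1 ≤ n := by omega
      have hseglen : ((divs.drop l.toNat).take n).length = n := by
        simp only [List.length_take, List.length_drop]
        omega
      have hne : ¬ ((divs.drop l.toNat).take n).isEmpty := by
        simp only [List.isEmpty_iff, ← List.length_eq_zero_iff] at *
        omega
      rw [searchGo, if_pos hle, searchAltGo, if_neg hne]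
      set m : Nat := (n - 1) / 2 with hm
      have hmn : m < n := by omega
      have hmalt : (((divs.drop l.toNat).take n).length - 1) / 2 = m := by
        rw [hseglen]
      have hfd : PySem.Int.floordiv (r - l) 2 = (m : Int) := by
        have hrl : r - l = ((n - 1 : Nat) : Int) := by omega
        rw [hrl]
        exact_mod_cast PySem.Int.floordiv_natCast (n - 1) 2
      have hmid : l + PySem.Int.floordiv (r - l) 2 = l + (m : Int) := by rw [hfd]
      -- the probed element agrees
      have hget : PySem.List.pyGet? divs (l + PySem.Int.floordiv (r - l) 2)
          = PySem.List.pyGet? ((divs.drop l.toNat).take n) (m : Int) := by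
        rw [hmid]
        have hc : l + (m : Int) = ((l.toNat + m : Nat) : Int) := by omega
        rw [hc, PySem.List.pyGet?_natCast, PySem.List.pyGet?_natCast,
          List.getElem?_take_of_lt hmn, List.getElem?_drop]
      simp only [hmalt]
      rw [hget, hmid]
      split_ifs with hdvd
      · rw [ih m hmn l (l + (m : Int) - 1) hl0 (by omega) (by omega) (by omega),
          List.take_take]
        congr 2
        omega
      · rw [ih (n - (m + 1)) (by omega) (l + (m : Int) + 1) r (by omega) (by omega) hrlen (by omega),
          List.drop_take, List.drop_drop,
          show ((l + (m : Int) + 1).toNat) = l.toNat + (m + 1) from by omega]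
    · -- empty segment: n = 0, r = l - 1
      have hn0 : n = 0 := by omega
      have hr : r = l - 1 := by omega
      rw [searchGo, if_neg hle, hn0]
      simp only [List.take_zero]
      rw [searchAltGo]
      simp [hr]

-- ===== VERDICT (by name: the statement is the Claim_ definition above) =====
theorem search_spec : Claim_equal_search := by
  intro a divs _hdom _hpre
  unfold Spec_search search search_alt
  have h := searchGo_eq_alt a divs divs.length 0 ((divs.length : Int) - 1)
    le_rfl (by omega) (by omega) (by omega)
  simpa using h
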